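-- pv_equiv track=rewrite | github.com/MarthinL/ssk | scripts/regenerate_hex_diagrams.py | convert_href_to_hex
-- ===== SOURCE A (Python) =====
-- def convert_href_to_hex(content):
--     """Convert human-readable xlink:href values to hex code equivalents."""
--
--     # Map human names to hex codes
--     replacements = {
--         'A0_ The SSK Extension.svg': 'dgm1305.svg',
--         'A1_ Value Decoder.svg': 'dgm1320.svg',
--         'A2_ Function Processor.svg': 'dgm1382.svg',
--         'A3_ Value Encoder.svg': 'dgm1450.svg',
--         'Project Concerns.svg': 'dgm24.svg',
--         'Implementation Concerns.svg': 'dgm824.svg',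
--         'Decomposition of SSK Concerns.svg': 'dgm333.svg',
--     }
--
--     for human_name, hex_code in replacements.items():
--         content = content.replace(f'xlink:href="{human_name}"', f'xlink:href="{hex_code}"')
--
--     return content
-- ===== SOURCE B (Python) =====
-- def convert_href_to_hex(content):
--     """Convert human-readable xlink:href values to hex code equivalents (single left-to-right pass)."""
--     replacements = {
--         'A0_ The SSK Extension.svg': 'dgm1305.svg',
--         'A1_ Value Decoder.svg': 'dgm1320.svg',
--         'A2_ Function Processor.svg': 'dgm1382.svg',
--         'A3_ Value Encoder.svg': 'dgm1450.svg',
--         'Project Concerns.svg': 'dgm24.svg',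
--         'Implementation Concerns.svg': 'dgm824.svg',
--         'Decomposition of SSK Concerns.svg': 'dgm333.svg',
--     }
--     pairs = [('xlink:href="%s"' % h, 'xlink:href="%s"' % x)
--              for h, x in replacements.items()]
--     out = []
--     i = 0
--     n = len(content)
--     while i < n:
--         for pat, rep in pairs:
--             if content.startswith(pat, i):
--                 out.append(rep)
--                 i += len(pat)
--                 break
--         else:
--             out.append(content[i])
--             i += 1
--     return ''.join(out)
-- ===== Notes on version B (the rewrite author's own statement) =====
-- stated objective: alternative
-- what changed: A runs seven sequential full-string str.replace passes (each rescanning the whole, partly rewritten content); B makes one left-to-right pass, trying the seven literal patterns at each position and jumping past a match, which is provably equivalent because no pattern overlaps another pattern occurrence or a replacement output.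
import Mathlib
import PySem

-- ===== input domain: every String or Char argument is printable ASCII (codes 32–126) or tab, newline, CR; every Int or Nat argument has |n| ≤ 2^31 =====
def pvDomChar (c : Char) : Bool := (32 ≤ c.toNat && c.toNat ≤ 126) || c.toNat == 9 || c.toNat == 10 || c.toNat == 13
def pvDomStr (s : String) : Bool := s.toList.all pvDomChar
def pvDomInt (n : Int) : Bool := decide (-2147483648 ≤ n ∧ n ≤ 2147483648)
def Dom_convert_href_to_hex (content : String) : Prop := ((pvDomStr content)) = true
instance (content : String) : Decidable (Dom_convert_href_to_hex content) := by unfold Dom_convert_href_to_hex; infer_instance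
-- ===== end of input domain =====

-- B replaces A's seven sequential full-string .replace passes by ONE left-to-right pass
-- trying the seven patterns at each position (objective: alternative single-pass algorithm).

-- ===== PORT A =====
def convert_href_to_hex (content : String) : String :=
  let c1 := PySem.Str.replace content "xlink:href=\"A0_ The SSK Extension.svg\"" "xlink:href=\"dgm1305.svg\""
  let c2 := PySem.Str.replace c1 "xlink:href=\"A1_ Value Decoder.svg\"" "xlink:href=\"dgm1320.svg\""
  let c3 := PySem.Str.replace c2 "xlink:href=\"A2_ Function Processor.svg\"" "xlink:href=\"dgm1382.svg\""
  let c4 := PySem.Str.replace c3 "xlink:href=\"A3_ Value Encoder.svg\"" "xlink:href=\"dgm1450.svg\""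
  let c5 := PySem.Str.replace c4 "xlink:href=\"Project Concerns.svg\"" "xlink:href=\"dgm24.svg\""
  let c6 := PySem.Str.replace c5 "xlink:href=\"Implementation Concerns.svg\"" "xlink:href=\"dgm824.svg\""
  let c7 := PySem.Str.replace c6 "xlink:href=\"Decomposition of SSK Concerns.svg\"" "xlink:href=\"dgm333.svg\""
  c7

-- ===== PORT B =====
-- the seven (pattern, replacement) pairs of Source B, each pattern split as head char + tail
def pvT1 : List Char := "link:href=\"A0_ The SSK Extension.svg\"".toList
def pvR1 : List Char := "xlink:href=\"dgm1305.svg\"".toList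
def pvT2 : List Char := "link:href=\"A1_ Value Decoder.svg\"".toList
def pvR2 : List Char := "xlink:href=\"dgm1320.svg\"".toList
def pvT3 : List Char := "link:href=\"A2_ Function Processor.svg\"".toList
def pvR3 : List Char := "xlink:href=\"dgm1382.svg\"".toList
def pvT4 : List Char := "link:href=\"A3_ Value Encoder.svg\"".toList
def pvR4 : List Char := "xlink:href=\"dgm1450.svg\"".toList
def pvT5 : List Char := "link:href=\"Project Concerns.svg\"".toList
def pvR5 : List Char := "xlink:href=\"dgm24.svg\"".toList
def pvT6 : List Char := "link:href=\"Implementation Concerns.svg\"".toList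
def pvR6 : List Char := "xlink:href=\"dgm824.svg\"".toList
def pvT7 : List Char := "link:href=\"Decomposition of SSK Concerns.svg\"".toList
def pvR7 : List Char := "xlink:href=\"dgm333.svg\"".toList
def pvPairs : List ((Char × List Char) × List Char) :=
  [(('x', pvT1), pvR1), (('x', pvT2), pvR2), (('x', pvT3), pvR3), (('x', pvT4), pvR4),
   (('x', pvT5), pvR5), (('x', pvT6), pvR6), (('x', pvT7), pvR7)]

-- Source B's while loop: at each position try the pairs in order; on a match emit the
-- replacement and jump past the pattern, else copy one character
def pvScan (pairs : List ((Char × List Char) × List Char)) : List Char → List Char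
  | [] => []
  | c :: t =>
    match pairs.find? (fun pr => (pr.1.1 :: pr.1.2).isPrefixOf (c :: t)) with
    | some pr => pr.2 ++ pvScan pairs (t.drop pr.1.2.length)
    | none => c :: pvScan pairs t
termination_by l => l.length
decreasing_by all_goals (simp; try omega)

def convert_href_to_hex_alt (content : String) : String :=
  String.ofList (pvScan pvPairs content.toList)

-- ===== PRECONDITION & SPEC =====
def Spec_convert_href_to_hex (content : String) (out : String) : Prop := out = convert_href_to_hex_alt content
instance (content : String) (out : String) : Decidable (Spec_convert_href_to_hex content out) := by unfold Spec_convert_href_to_hex; infer_instance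

-- ===== CLAIM (what is proved, stated in full; the proofs are below) =====
def Claim_equal_convert_href_to_hex : Prop := ∀ (content : String), Dom_convert_href_to_hex content → Spec_convert_href_to_hex content (convert_href_to_hex content)

-- ===== LEMMAS AND PROOFS =====

-- A's str.replace with a nonempty pattern o :: os, as structural recursion on the string
def pvRep1 (o : Char) (os r : List Char) : List Char → List Char
  | [] => []
  | c :: t =>
    if (o :: os).isPrefixOf (c :: t) then r ++ pvRep1 o os r (t.drop os.length)
    else c :: pvRep1 o os r t
termination_by l => l.length
decreasing_by all_goals (simp; try omega)

theorem pvRep1_nil (o : Char) (os r : List Char) : pvRep1 o os r [] = [] := by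
  rw [pvRep1.eq_def]

theorem pvRep1_cons_pos {o c : Char} {os t : List Char} (r : List Char)
    (h : (o :: os) <+: (c :: t)) :
    pvRep1 o os r (c :: t) = r ++ pvRep1 o os r (t.drop os.length) := by
  rw [pvRep1.eq_def]
  simp [List.isPrefixOf_iff_prefix.mpr h]

theorem pvRep1_cons_neg {o c : Char} {os t : List Char} (r : List Char)
    (h : ¬ (o :: os) <+: (c :: t)) :
    pvRep1 o os r (c :: t) = c :: pvRep1 o os r t := by
  rw [pvRep1.eq_def]
  simp [(List.isPrefixOf_iff_prefix (l₁ := o :: os)).not.mpr h]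

theorem pvScan_nil (ps : List ((Char × List Char) × List Char)) : pvScan ps [] = [] := by
  rw [pvScan.eq_def]

theorem pvScan_cons_some {ps : List ((Char × List Char) × List Char)} {c : Char}
    {t : List Char} {pr : (Char × List Char) × List Char}
    (h : ps.find? (fun pr => (pr.1.1 :: pr.1.2).isPrefixOf (c :: t)) = some pr) :
    pvScan ps (c :: t) = pr.2 ++ pvScan ps (t.drop pr.1.2.length) := by
  rw [pvScan.eq_def]
  simp [h]

theorem pvScan_cons_none {ps : List ((Char × List Char) × List Char)} {c : Char}
    {t : List Char}
    (h : ps.find? (fun pr => (pr.1.1 :: pr.1.2).isPrefixOf (c :: t)) = none) :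
    pvScan ps (c :: t) = c :: pvScan ps t := by
  rw [pvScan.eq_def]
  simp [h]

-- mismatch between q and s within their overlap
def pvMism (q s : List Char) : Bool :=
  (List.range (min q.length s.length)).any (fun i => q[i]? != s[i]?)
-- q never starts matching at any position inside s, whatever follows s
def pvNoSub (q s : List Char) : Bool :=
  (List.range s.length).all (fun m => pvMism q (s.drop m))
-- p never starts matching strictly inside q, whatever follows q
def pvNoSub1 (p q : List Char) : Bool :=
  (List.range q.length).all (fun m => m == 0 || pvMism p (q.drop m))
-- no tail of q can continue into s, whatever follows s
def pvNoTail (q s : List Char) : Bool :=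
  (List.range q.length).all (fun m => pvMism (q.drop m) s)

theorem pvMism_not_prefix {q s : List Char} (h : pvMism q s = true) (t : List Char) :
    ¬ q <+: (s ++ t) := by
  rcases List.any_eq_true.mp h with ⟨i, him, hne⟩
  have hi := List.mem_range.mp him
  have h1 : i < q.length := lt_of_lt_of_le hi (Nat.min_le_left _ _)
  have h2 : i < s.length := lt_of_lt_of_le hi (Nat.min_le_right _ _)
  intro hp
  have hq : q[i] = (s ++ t)[i]'(Nat.lt_of_lt_of_le h1 hp.length_le) :=
    List.IsPrefix.getElem hp h1
  rw [List.getElem_append_left h2] at hq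
  simp [h1, h2, hq] at hne

theorem pvRep1_append {o : Char} {os r : List Char} : ∀ {s : List Char},
    pvNoSub (o :: os) s = true → ∀ X, pvRep1 o os r (s ++ X) = s ++ pvRep1 o os r X := by
  intro s
  induction s with
  | nil => intro _ X; simp
  | cons c s' ih =>
    intro h X
    have h0 : pvMism (o :: os) (c :: s') = true := by
      have := List.all_eq_true.mp h 0 (List.mem_range.mpr (by simp))
      simpa using this
    have hnp : ¬ (o :: os) <+: (c :: (s' ++ X)) := by
      have := pvMism_not_prefix h0 X
      simpa using this
    have h' : pvNoSub (o :: os) s' = true := by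
      apply List.all_eq_true.mpr
      intro m hm
      have hm' := List.mem_range.mp hm
      have := List.all_eq_true.mp h (m + 1)
        (List.mem_range.mpr (by simp; omega))
      simpa [List.drop_succ_cons] using this
    rw [List.cons_append, pvRep1_cons_neg r hnp, ih h' X, List.cons_append]

theorem pvScan_copy {ps : List ((Char × List Char) × List Char)} : ∀ {s : List Char},
    ∀ {rest : List Char},
    (∀ m < s.length, ∀ pr ∈ ps, ¬ (pr.1.1 :: pr.1.2) <+: (s.drop m ++ rest)) →
    pvScan ps (s ++ rest) = s ++ pvScan ps rest := by
  intro s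
  induction s with
  | nil => intro rest _; simp
  | cons c s' ih =>
    intro rest h
    have hnone : ps.find? (fun pr => (pr.1.1 :: pr.1.2).isPrefixOf (c :: (s' ++ rest))) = none := by
      apply List.find?_eq_none.mpr
      intro pr hpr
      have := h 0 (by simp) pr hpr
      simp only [List.drop_zero, List.cons_append] at this
      simpa [List.isPrefixOf_iff_prefix] using this
    rw [List.cons_append, pvScan_cons_none hnone]
    rw [ih (fun m hm pr hpr => by
      have := h (m + 1) (by simp; omega) pr hpr
      simpa [List.drop_succ_cons] using this)]
    simp

theorem pvScan_no_match {ps : List ((Char × List Char) × List Char)} {o : Char} {os : List Char}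
    (hC : ∀ pr ∈ ps, pvNoTail (o :: os) pr.2 = true) :
    ∀ l m, m < (o :: os).length → ¬ ((o :: os).drop m <+: l) →
      ¬ ((o :: os).drop m <+: pvScan ps l) := by
  intro l
  induction l using pvScan.induct ps with
  | case1 =>
    intro m hm _
    rw [pvScan_nil]
    intro hp
    have hlen := hp.length_le
    simp at hlen hm
    omega
  | case2 c t pr hfind ih =>
    intro m hm _
    rw [pvScan_cons_some hfind]
    have hmem := List.mem_of_find?_eq_some hfind
    have hmism : pvMism ((o :: os).drop m) pr.2 = true := by
      have := List.all_eq_true.mp (hC pr hmem) m (List.mem_range.mpr hm)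
      simpa using this
    exact pvMism_not_prefix hmism _
  | case3 c t hfind ih =>
    intro m hm hraw
    rw [pvScan_cons_none hfind]
    intro hp
    have hqm : (o :: os).drop m = (o :: os)[m] :: (o :: os).drop (m + 1) :=
      List.drop_eq_getElem_cons hm
    rw [hqm] at hp hraw
    rcases List.cons_prefix_cons.mp hp with ⟨hc, hp'⟩
    by_cases hend : m + 1 < (o :: os).length
    · have hraw' : ¬ ((o :: os).drop (m + 1) <+: t) := by
        intro hh
        exact hraw (List.cons_prefix_cons.mpr ⟨hc, hh⟩)
      have := ih (m + 1) hend hraw'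
      rw [List.drop_eq_getElem_cons hend] at this hp'
      exact this hp'
    · have : (o :: os).drop (m + 1) = [] := by
        apply List.drop_eq_nil_of_le; omega
      rw [this] at hraw
      exact hraw (List.cons_prefix_cons.mpr ⟨hc, List.nil_prefix⟩)

theorem pvStep {ps : List ((Char × List Char) × List Char)} {o : Char} {os r : List Char}
    (hA : ps.all (fun pr => pvNoSub (o :: os) pr.2) = true)
    (hB : ps.all (fun pr => pvNoSub1 (pr.1.1 :: pr.1.2) (o :: os)) = true)
    (hC : ps.all (fun pr => pvNoTail (o :: os) pr.2) = true) :
    ∀ l, pvRep1 o os r (pvScan ps l) = pvScan (ps ++ [((o, os), r)]) l := by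
  have hA' := List.all_eq_true.mp hA
  have hB' := List.all_eq_true.mp hB
  have hC' := List.all_eq_true.mp hC
  intro l
  induction l using pvScan.induct (ps ++ [((o, os), r)]) with
  | case1 =>
    rw [pvScan_nil, pvScan_nil, pvRep1_nil]
  | case2 c t pr hfind ih =>
    rw [List.find?_append] at hfind
    cases hps : ps.find? (fun pr => (pr.1.1 :: pr.1.2).isPrefixOf (c :: t)) with
    | some pr0 =>
      rw [hps] at hfind
      have hpr : pr0 = pr := by simpa using hfind
      subst hpr
      have hmem := List.mem_of_find?_eq_some hps
      have hfind2 : (ps ++ [((o, os), r)]).find?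
          (fun pr => (pr.1.1 :: pr.1.2).isPrefixOf (c :: t)) = some pr0 := by
        rw [List.find?_append, hps]; rfl
      rw [pvScan_cons_some hfind2, pvScan_cons_some hps,
        pvRep1_append (by simpa using hA' pr0 hmem) _, ih]
    | none =>
      rw [hps, Option.none_or] at hfind
      by_cases hq : (o :: os) <+: (c :: t)
      · have hfq : (fun pr => (pr.1.1 :: pr.1.2).isPrefixOf (c :: t)) ((o, os), r) = true := by
          simpa [List.isPrefixOf_iff_prefix] using hq
        have hpr : pr = ((o, os), r) := by
          simpa using List.mem_of_find?_eq_some hfind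
        subst hpr
        -- the new pattern matches: A's later pass and B's scan both replace here
        have hc : o = c := (List.cons_prefix_cons.mp hq).1
        have hos : os <+: t := (List.cons_prefix_cons.mp hq).2
        obtain ⟨u, hu⟩ := hos
        have hdrop : t.drop os.length = u := by rw [← hu]; simp
        have hsplit : c :: t = (o :: os) ++ u := by rw [hc, ← hu]; rfl
        have hcopy : pvScan ps (c :: t) = (o :: os) ++ pvScan ps u := by
          rw [hsplit]
          apply pvScan_copy
          intro m hm pr' hpr'
          rcases Nat.eq_zero_or_pos m with hm0 | hm1
          · subst hm0
            simp only [List.drop_zero]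
            rw [← hsplit]
            have := List.find?_eq_none.mp hps pr' hpr'
            simpa [List.isPrefixOf_iff_prefix] using this
          · have := List.all_eq_true.mp (hB' pr' hpr') m (List.mem_range.mpr hm)
            have hmism : pvMism (pr'.1.1 :: pr'.1.2) ((o :: os).drop m) = true := by
              simp only [Nat.pos_iff_ne_zero] at hm1
              simpa [beq_iff_eq, hm1] using this
            exact pvMism_not_prefix hmism _
        rw [hcopy]
        have hstep : pvRep1 o os r ((o :: os) ++ pvScan ps u) =
            r ++ pvRep1 o os r (pvScan ps u) := by
          have hpre : (o :: os) <+: (o :: (os ++ pvScan ps u)) :=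
            List.cons_prefix_cons.mpr ⟨rfl, List.prefix_append _ _⟩
          rw [List.cons_append, pvRep1_cons_pos r hpre, List.drop_left]
        have hfind3 : (ps ++ [((o, os), r)]).find?
            (fun pr => (pr.1.1 :: pr.1.2).isPrefixOf (c :: t)) = some ((o, os), r) := by
          rw [List.find?_append, hps, Option.none_or]; exact hfind
        rw [hstep, pvScan_cons_some hfind3]
        simp only [hdrop] at ih ⊢
        rw [ih]
      · exfalso
        have hpr : pr = ((o, os), r) := by
          simpa using List.mem_of_find?_eq_some hfind
        subst hpr
        have := List.find?_some hfind
        simp [List.isPrefixOf_iff_prefix] at this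
        exact hq (List.cons_prefix_cons.mpr this)
  | case3 c t hfind ih =>
    rw [List.find?_append] at hfind
    have hps : ps.find? (fun pr => (pr.1.1 :: pr.1.2).isPrefixOf (c :: t)) = none := by
      cases hps : ps.find? (fun pr => (pr.1.1 :: pr.1.2).isPrefixOf (c :: t)) with
      | none => rfl
      | some pr0 => rw [hps] at hfind; simp at hfind
    rw [hps, Option.none_or] at hfind
    have hq : ¬ ((o :: os) <+: (c :: t)) := by
      intro hq
      have := List.find?_eq_none.mp hfind ((o, os), r) (by simp)
      simp [List.isPrefixOf_iff_prefix] at this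
      exact this (List.cons_prefix_cons.mp hq).1 (List.cons_prefix_cons.mp hq).2
    have hnm : ¬ ((o :: os) <+: pvScan ps (c :: t)) := by
      have := pvScan_no_match (ps := ps) (o := o) (os := os)
        (fun pr hpr => hC' pr hpr) (c :: t) 0 (by simp) (by simpa using hq)
      simpa using this
    rw [pvScan_cons_none hps] at hnm ⊢
    rw [pvScan_cons_none (by rw [List.find?_append, hps, Option.none_or]; exact hfind), ← ih]
    exact pvRep1_cons_neg r hnm

theorem pvScan_nil_pairs (l : List Char) : pvScan [] l = l := by
  induction l with
  | nil => exact pvScan_nil []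
  | cons c t ih => rw [pvScan_cons_none (by simp), ih]

theorem pvGo_eq (o : Char) (os r : List Char) :
    ∀ fuel l acc, l.length ≤ fuel →
      PySem.Chars.replace.go (o :: os) r fuel l acc = acc.reverse ++ pvRep1 o os r l := by
  intro fuel
  induction fuel with
  | zero =>
    intro l acc hl
    have : l = [] := List.eq_nil_of_length_eq_zero (by omega)
    subst this
    rw [PySem.Chars.replace.go, pvRep1_nil]
  | succ n ih =>
    intro l acc hl
    cases l with
    | nil =>
      rw [PySem.Chars.replace.go, pvRep1_nil]
      · simp
      · omega
    | cons c t =>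
      rw [PySem.Chars.replace.go]
      by_cases hp : (o :: os) <+: (c :: t)
      · rw [if_pos (List.isPrefixOf_iff_prefix.mpr hp)]
        have hdrop : List.drop (o :: os).length (c :: t) = t.drop os.length := by
          simp
        rw [hdrop, ih _ _ (by simp at hl ⊢; omega), pvRep1_cons_pos r hp]
        simp
      · rw [if_neg (fun hh => hp (List.isPrefixOf_iff_prefix.mp hh))]
        rw [ih _ _ (by simp at hl ⊢; omega), pvRep1_cons_neg r hp]
        simp

theorem pvReplace_eq_rep1 (o : Char) (os r l : List Char) :
    PySem.Chars.replace l (o :: os) r = pvRep1 o os r l := by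
  rw [PySem.Chars.replace]
  simp only [List.isEmpty_cons, Bool.false_eq_true, if_false]
  rw [pvGo_eq o os r l.length l [] (le_refl _)]
  simp

-- the seven sequential replaces equal the one-pass scan over all seven pairs
theorem pvChain (cs : List Char) :
    pvRep1 'x' pvT7 pvR7 (pvRep1 'x' pvT6 pvR6 (pvRep1 'x' pvT5 pvR5 (pvRep1 'x' pvT4 pvR4
      (pvRep1 'x' pvT3 pvR3 (pvRep1 'x' pvT2 pvR2 (pvRep1 'x' pvT1 pvR1 cs)))))) =
    pvScan pvPairs cs := by
  have e1 : pvRep1 'x' pvT1 pvR1 cs = pvScan [(('x', pvT1), pvR1)] cs := by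
    have h := @pvStep [] 'x' pvT1 pvR1 (by decide) (by decide) (by decide) cs
    rw [pvScan_nil_pairs cs] at h
    simpa using h
  have e2 := @pvStep [(('x', pvT1), pvR1)] 'x' pvT2 pvR2 (by decide) (by decide) (by decide) cs
  have e3 := @pvStep [(('x', pvT1), pvR1), (('x', pvT2), pvR2)] 'x' pvT3 pvR3 (by decide) (by decide) (by decide) cs
  have e4 := @pvStep [(('x', pvT1), pvR1), (('x', pvT2), pvR2), (('x', pvT3), pvR3)] 'x' pvT4 pvR4 (by decide) (by decide) (by decide) cs
  have e5 := @pvStep [(('x', pvT1), pvR1), (('x', pvT2), pvR2), (('x', pvT3), pvR3), (('x', pvT4), pvR4)] 'x' pvT5 pvR5 (by decide) (by decide) (by decide) cs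
  have e6 := @pvStep [(('x', pvT1), pvR1), (('x', pvT2), pvR2), (('x', pvT3), pvR3), (('x', pvT4), pvR4), (('x', pvT5), pvR5)] 'x' pvT6 pvR6 (by decide) (by decide) (by decide) cs
  have e7 := @pvStep [(('x', pvT1), pvR1), (('x', pvT2), pvR2), (('x', pvT3), pvR3), (('x', pvT4), pvR4), (('x', pvT5), pvR5), (('x', pvT6), pvR6)] 'x' pvT7 pvR7 (by decide) (by decide) (by decide) cs
  simp only [List.cons_append, List.nil_append] at e2 e3 e4 e5 e6 e7
  rw [e1, e2, e3, e4, e5, e6, e7]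
  rfl

-- ===== VERDICT (by name: the statement is the Claim_ definition above) =====
theorem convert_href_to_hex_spec : Claim_equal_convert_href_to_hex := by
  intro content _
  unfold Spec_convert_href_to_hex convert_href_to_hex convert_href_to_hex_alt
  have h1 : ∀ l r, PySem.Chars.replace l ("xlink:href=\"A0_ The SSK Extension.svg\"" : String).toList r = pvRep1 'x' pvT1 r l := by
    intro l r
    rw [show ("xlink:href=\"A0_ The SSK Extension.svg\"" : String).toList = 'x' :: pvT1 from by decide]
    exact pvReplace_eq_rep1 _ _ _ _
  have h2 : ∀ l r, PySem.Chars.replace l ("xlink:href=\"A1_ Value Decoder.svg\"" : String).toList r = pvRep1 'x' pvT2 r l := by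
    intro l r
    rw [show ("xlink:href=\"A1_ Value Decoder.svg\"" : String).toList = 'x' :: pvT2 from by decide]
    exact pvReplace_eq_rep1 _ _ _ _
  have h3 : ∀ l r, PySem.Chars.replace l ("xlink:href=\"A2_ Function Processor.svg\"" : String).toList r = pvRep1 'x' pvT3 r l := by
    intro l r
    rw [show ("xlink:href=\"A2_ Function Processor.svg\"" : String).toList = 'x' :: pvT3 from by decide]
    exact pvReplace_eq_rep1 _ _ _ _
  have h4 : ∀ l r, PySem.Chars.replace l ("xlink:href=\"A3_ Value Encoder.svg\"" : String).toList r = pvRep1 'x' pvT4 r l := by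
    intro l r
    rw [show ("xlink:href=\"A3_ Value Encoder.svg\"" : String).toList = 'x' :: pvT4 from by decide]
    exact pvReplace_eq_rep1 _ _ _ _
  have h5 : ∀ l r, PySem.Chars.replace l ("xlink:href=\"Project Concerns.svg\"" : String).toList r = pvRep1 'x' pvT5 r l := by
    intro l r
    rw [show ("xlink:href=\"Project Concerns.svg\"" : String).toList = 'x' :: pvT5 from by decide]
    exact pvReplace_eq_rep1 _ _ _ _
  have h6 : ∀ l r, PySem.Chars.replace l ("xlink:href=\"Implementation Concerns.svg\"" : String).toList r = pvRep1 'x' pvT6 r l := by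
    intro l r
    rw [show ("xlink:href=\"Implementation Concerns.svg\"" : String).toList = 'x' :: pvT6 from by decide]
    exact pvReplace_eq_rep1 _ _ _ _
  have h7 : ∀ l r, PySem.Chars.replace l ("xlink:href=\"Decomposition of SSK Concerns.svg\"" : String).toList r = pvRep1 'x' pvT7 r l := by
    intro l r
    rw [show ("xlink:href=\"Decomposition of SSK Concerns.svg\"" : String).toList = 'x' :: pvT7 from by decide]
    exact pvReplace_eq_rep1 _ _ _ _
  simp only [PySem.Str.replace, String.toList_ofList, h1, h2, h3, h4, h5, h6, h7]
  exact congrArg String.ofList (pvChain content.toList)
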